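-- pv_equiv track=rewrite | github.com/VladyslavLopata/DMT_Labs | lab2/solver.py | maxmax
-- ===== SOURCE A (Python) =====
-- def maxmax(matrix, alternatives):
--     maximums = []
--     for i in range(0, len(matrix[0])) :
--         column = []
--         for j in range(0, len(matrix)) :
--             column.append(matrix[j][i])
--         maximums.append( (max(column) , i) )
--
--     result = max(maximums, key=lambda tup: tup[0])
--     ret_result = (result[0] ,alternatives[result[1]])
--     return ret_result
-- ===== SOURCE B (Python) =====
-- def maxmax(matrix, alternatives):
--     # two passes: global maximum first, then leftmost column containing it
--     ncols = len(matrix[0])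
--     best = max(max(row[:ncols]) for row in matrix)
--     for i in range(ncols):
--         if any(row[i] == best for row in matrix):
--             return (best, alternatives[i])
-- ===== Notes on version B (the rewrite author's own statement) =====
-- stated objective: simpler
-- what changed: A builds a per-column (max, index) table and then takes the argmax of that table; B first computes the single global maximum over the (column-trimmed) matrix and then scans columns left to right for the first one containing it.
-- outside the precondition, e.g. on maxmax([[5, 1]], ['a']): A returns (5, 'a'), B returns (5, 'a')
import Mathlib
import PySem

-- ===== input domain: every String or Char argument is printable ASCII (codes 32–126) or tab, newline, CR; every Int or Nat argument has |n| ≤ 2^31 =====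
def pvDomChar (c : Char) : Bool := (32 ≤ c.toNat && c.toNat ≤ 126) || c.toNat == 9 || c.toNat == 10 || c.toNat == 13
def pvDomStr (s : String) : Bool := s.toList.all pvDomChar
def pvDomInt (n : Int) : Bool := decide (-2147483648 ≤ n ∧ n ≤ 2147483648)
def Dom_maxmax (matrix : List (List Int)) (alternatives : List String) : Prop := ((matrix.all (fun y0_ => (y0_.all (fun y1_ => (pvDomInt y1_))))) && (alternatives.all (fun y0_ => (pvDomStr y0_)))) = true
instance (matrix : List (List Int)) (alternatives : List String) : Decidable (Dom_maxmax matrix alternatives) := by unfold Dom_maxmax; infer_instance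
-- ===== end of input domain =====

-- B replaces A's per-column (max, index) table + argmax with a simpler two-pass decomposition:
-- compute the global maximum, then return the leftmost column containing it.

-- ===== PORT A =====
def maxmax (matrix : List (List Int)) (alternatives : List String) : Int × String :=
  let maximums : List (Int × Int) :=
    (PySem.List.pyRange 0 (PySem.List.len (PySem.List.pyGetD matrix 0 []))).foldl
      (fun acc i =>
        let column : List Int :=
          (PySem.List.pyRange 0 (PySem.List.len matrix)).foldl
            (fun col j => col ++ [PySem.List.pyGetD (PySem.List.pyGetD matrix j []) i 0]) []
        acc ++ [((PySem.List.max? column (fun x => x)).getD 0, i)]) []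
  let result : Int × Int := (PySem.List.max? maximums Prod.fst).getD (0, 0)
  (result.1, PySem.List.pyGetD alternatives result.2 "")

-- ===== PORT B =====
-- the early-returning 'for i in range(ncols)' loop of Source B; the [] case is Python B falling
-- off the loop (returns None), which Pre_ excludes
def maxmaxFind (matrix : List (List Int)) (alternatives : List String) (best : Int) :
    List Int → Int × String
  | [] => (best, "")
  | i :: rest =>
      if matrix.any (fun row => PySem.List.pyGetD row i 0 == best) then
        (best, PySem.List.pyGetD alternatives i "")
      else maxmaxFind matrix alternatives best rest

def maxmax_alt (matrix : List (List Int)) (alternatives : List String) : Int × String :=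
  let ncols : Int := PySem.List.len (PySem.List.pyGetD matrix 0 [])
  let best : Int :=
    (PySem.List.max?
      (matrix.map (fun row =>
        (PySem.List.max? (PySem.List.slice row none (some ncols)) (fun x => x)).getD 0))
      (fun x => x)).getD 0
  maxmaxFind matrix alternatives best (PySem.List.pyRange 0 ncols)

-- ===== PRECONDITION & SPEC =====
-- Pre_ excludes inputs where A raises (empty matrix, empty first row, a row shorter than the
-- first row, too few alternatives for the winning column).  It requires alternatives to cover
-- ALL columns, so it also excludes inputs with fewer alternatives than columns on which A still
-- returns because the winning column happens to lie early: there alternatives[i] being in range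
-- is an accident of the data, not of the input shape.
def Pre_maxmax (matrix : List (List Int)) (alternatives : List String) : Prop :=
  matrix ≠ [] ∧ matrix.headI ≠ [] ∧
  (∀ row ∈ matrix, matrix.headI.length ≤ row.length) ∧
  matrix.headI.length ≤ alternatives.length
instance (matrix : List (List Int)) (alternatives : List String) : Decidable (Pre_maxmax matrix alternatives) := by unfold Pre_maxmax; infer_instance

def pvWitness_maxmax : List (List Int) × List String := ([[3, 1], [2, 5]], ["a", "b"])

def Spec_maxmax (matrix : List (List Int)) (alternatives : List String) (out : Int × String) : Prop := out = maxmax_alt matrix alternatives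
instance (matrix : List (List Int)) (alternatives : List String) (out : Int × String) : Decidable (Spec_maxmax matrix alternatives out) := by unfold Spec_maxmax; infer_instance

-- ===== CLAIM (what is proved, stated in full; the proofs are below) =====
def Claim_equal_maxmax : Prop := ∀ (matrix : List (List Int)) (alternatives : List String), Dom_maxmax matrix alternatives → Pre_maxmax matrix alternatives → Spec_maxmax matrix alternatives (maxmax matrix alternatives)

-- ===== LEMMAS AND PROOFS =====

-- the column i of the (trimmed) matrix, and its Python max
def pvCol (matrix : List (List Int)) (i : Int) : List Int :=
  matrix.map (fun row => PySem.List.pyGetD row i 0)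

def pvCm (matrix : List (List Int)) (i : Int) : Int :=
  (PySem.List.max? (pvCol matrix i) (fun x => x)).getD 0

-- the accumulator step of PySem.List.max?
def pmStep {α : Type} (key : α → Int) (acc : Option α) (x : α) : Option α :=
  match acc with
  | none => some x
  | some m => if key m < key x then some x else some m

lemma max?_eq_foldl {α : Type} (key : α → Int) (xs : List α) :
    PySem.List.max? xs key = xs.foldl (pmStep key) none := rfl

lemma foldl_pmStep_of_le {α : Type} (key : α → Int) :
    ∀ (t : List α) (x : α), (∀ y ∈ t, key y ≤ key x) → t.foldl (pmStep key) (some x) = some x := by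
  intro t
  induction t with
  | nil => intro x _; rfl
  | cons z rest ih =>
      intro x h
      have hz : ¬ key x < key z := not_lt_of_ge (h z (by simp))
      simp only [List.foldl_cons, pmStep, if_neg hz]
      exact ih x (fun y hy => h y (by simp [hy]))

lemma foldl_pmStep_congr {α : Type} (key : α → Int) :
    ∀ (t : List α) (x y : α), key y ≤ key x → (∃ z ∈ t, key x < key z) →
      t.foldl (pmStep key) (some x) = t.foldl (pmStep key) (some y) := by
  intro t
  induction t with
  | nil => intro x y _ h; simp at h
  | cons z rest ih =>
      intro x y hyx ⟨w, hw, hxw⟩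
      by_cases hxz : key x < key z
      · have hyz : key y < key z := lt_of_le_of_lt hyx hxz
        simp only [List.foldl_cons, pmStep, if_pos hxz]
        simp [if_pos hyz]
      · have hwrest : w ∈ rest := by
          rcases List.mem_cons.mp hw with h | h
          · exact absurd (h ▸ hxw) hxz
          · exact h
        simp only [List.foldl_cons, pmStep, if_neg hxz]
        by_cases hyz : key y < key z
        · simp only [if_pos hyz]
          exact ih x z (not_lt.mp hxz) ⟨w, hwrest, hxw⟩
        · simp only [if_neg hyz]
          exact ih x y hyx ⟨w, hwrest, hxw⟩

lemma max?_cons_of_le {α : Type} (key : α → Int) (x : α) (t : List α)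
    (h : ∀ y ∈ t, key y ≤ key x) : PySem.List.max? (x :: t) key = some x := by
  rw [max?_eq_foldl]
  simp only [List.foldl_cons]
  exact foldl_pmStep_of_le key t x h

lemma max?_cons_of_lt {α : Type} (key : α → Int) (x : α) (t : List α)
    (h : ∃ y ∈ t, key x < key y) : PySem.List.max? (x :: t) key = PySem.List.max? t key := by
  obtain ⟨w, hw, hxw⟩ := h
  cases t with
  | nil => simp at hw
  | cons z rest =>
      rw [max?_eq_foldl, max?_eq_foldl]
      simp only [List.foldl_cons]
      show List.foldl (pmStep key) (pmStep key (some x) z) rest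
         = List.foldl (pmStep key) (some z) rest
      by_cases hxz : key x < key z
      · simp [pmStep, if_pos hxz]
      · simp only [pmStep, if_neg hxz]
        have hwrest : w ∈ rest := by
          rcases List.mem_cons.mp hw with h | h
          · exact absurd (h ▸ hxw) hxz
          · exact h
        exact foldl_pmStep_congr key rest x z (not_lt.mp hxz) ⟨w, hwrest, hxw⟩

lemma pvCol_ne_nil {matrix : List (List Int)} (hm : matrix ≠ []) (i : Int) :
    pvCol matrix i ≠ [] := by
  simp [pvCol, hm]

lemma pvCm_mem {matrix : List (List Int)} (hm : matrix ≠ []) (i : Int) :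
    pvCm matrix i ∈ pvCol matrix i := by
  cases e : PySem.List.max? (pvCol matrix i) (fun x => x) with
  | none => exact absurd ((PySem.List.max?_eq_none_iff _ _).mp e) (pvCol_ne_nil hm i)
  | some m =>
      have := PySem.List.max?_mem e
      simpa [pvCm, e] using this

lemma pvCm_isMax {matrix : List (List Int)} (hm : matrix ≠ []) (i : Int) :
    ∀ y ∈ pvCol matrix i, y ≤ pvCm matrix i := by
  cases e : PySem.List.max? (pvCol matrix i) (fun x => x) with
  | none => exact absurd ((PySem.List.max?_eq_none_iff _ _).mp e) (pvCol_ne_nil hm i)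
  | some m =>
      intro y hy
      have := PySem.List.max?_isMax e y hy
      simpa [pvCm, e] using this

-- the heart: A's argmax over [(colmax i, i)] and B's find-first-column loop agree,
-- for any index list l on which M bounds every column max and is attained.
lemma find_loop (matrix : List (List Int)) (alts : List String) (M : Int)
    (hm : matrix ≠ []) :
    ∀ (l : List Int), (∀ i ∈ l, pvCm matrix i ≤ M) → (∃ i ∈ l, pvCm matrix i = M) →
      ∃ i0, PySem.List.max? (l.map (fun i => (pvCm matrix i, i))) Prod.fst = some (M, i0)
        ∧ maxmaxFind matrix alts M l = (M, PySem.List.pyGetD alts i0 "") := by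
  intro l
  induction l with
  | nil => intro _ h; simp at h
  | cons i rest ih =>
      intro h1 h2
      by_cases hc : pvCm matrix i = M
      · refine ⟨i, ?_, ?_⟩
        · rw [List.map_cons, max?_cons_of_le]
          · rw [hc]
          · rintro y hy
            obtain ⟨j, hj, rfl⟩ := List.mem_map.mp hy
            simpa [hc] using h1 j (by simp [hj])
        · have hMcol : M ∈ pvCol matrix i := hc ▸ pvCm_mem hm i
          obtain ⟨row, hrow, hval⟩ := List.mem_map.mp (by unfold pvCol at hMcol; exact hMcol)
          have hany : matrix.any (fun row => PySem.List.pyGetD row i 0 == M) = true :=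
            List.any_eq_true.mpr ⟨row, hrow, by simp [hval]⟩
          simp [maxmaxFind, hany]
      · have hlt : pvCm matrix i < M := lt_of_le_of_ne (h1 i (by simp)) hc
        obtain ⟨j, hj, hjM⟩ := h2
        have hjrest : j ∈ rest := by
          rcases List.mem_cons.mp hj with h | h
          · exact absurd (h ▸ hjM) hc
          · exact h
        have hany : matrix.any (fun row => PySem.List.pyGetD row i 0 == M) = false := by
          simp only [List.any_eq_false, beq_iff_eq]
          intro row hrow hvm
          have hMcol : M ∈ pvCol matrix i := by
            unfold pvCol; exact List.mem_map.mpr ⟨row, hrow, hvm⟩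
          have : M ≤ pvCm matrix i := pvCm_isMax hm i M hMcol
          omega
        obtain ⟨i0, hA, hB⟩ := ih (fun k hk => h1 k (by simp [hk])) ⟨j, hjrest, hjM⟩
        refine ⟨i0, ?_, ?_⟩
        · rw [List.map_cons, max?_cons_of_lt, hA]
          exact ⟨(pvCm matrix j, j), List.mem_map.mpr ⟨j, hjrest, rfl⟩, by simpa [hjM] using hlt⟩
        · simpa [maxmaxFind, hany] using hB

-- A's inner append loop builds exactly column i
lemma column_eq (matrix : List (List Int)) (i : Int) :
    (PySem.List.pyRange 0 (PySem.List.len matrix)).foldl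
      (fun col j => col ++ [PySem.List.pyGetD (PySem.List.pyGetD matrix j []) i 0]) []
    = pvCol matrix i := by
  rw [PySem.List.foldl_append_singleton_eq_map]
  have h := PySem.List.map_pyGetD_pyRange_zero matrix ([] : List Int)
  calc List.map (fun j => PySem.List.pyGetD (PySem.List.pyGetD matrix j []) i 0)
          (PySem.List.pyRange 0 (PySem.List.len matrix))
      = List.map (fun row => PySem.List.pyGetD row i 0)
          (List.map (fun j => PySem.List.pyGetD matrix j []) (PySem.List.pyRange 0 (PySem.List.len matrix))) := by
        rw [List.map_map]; rfl
    _ = pvCol matrix i := by rw [h]; rfl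

-- ===== VERDICT (by name: the statement is the Claim_ definition above) =====
theorem maxmax_spec : Claim_equal_maxmax := by
  intro matrix alternatives _ hpre
  obtain ⟨hm, hh, hlen, _⟩ := hpre
  obtain ⟨r, rs, rfl⟩ := List.exists_cons_of_ne_nil hm
  have hr : r ≠ [] := by simpa using hh
  have hrpos : 0 < r.length := List.length_pos_iff.mpr hr
  have hlen' : ∀ row ∈ r :: rs, r.length ≤ row.length := by simpa using hlen
  -- names for the shared quantities
  set matrix := r :: rs with hmat
  have hm' : matrix ≠ [] := by simp [hmat]
  have hget0 : PySem.List.pyGetD matrix 0 [] = r := by simp [hmat, PySem.List.pyGetD_zero_cons]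
  have hc : PySem.List.len (PySem.List.pyGetD matrix 0 []) = (r.length : Int) := by
    rw [hget0]; rfl
  set c : Int := (r.length : Int) with hcdef
  -- B's best value
  set R : List Int := matrix.map (fun row =>
      (PySem.List.max? (PySem.List.slice row none (some c)) (fun x => x)).getD 0) with hR
  set best : Int := (PySem.List.max? R (fun x => x)).getD 0 with hbest
  -- per-row facts about the trimmed row and its max
  have hslice : ∀ row : List Int, PySem.List.slice row none (some c) = row.take r.length := by
    intro row
    rw [hcdef]
    exact PySem.List.slice_to_natCast row r.length
  have hRne : R ≠ [] := by simp [hR, hmat]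
  have hbestmem : best ∈ R := by
    cases e : PySem.List.max? R (fun x => x) with
    | none => exact absurd ((PySem.List.max?_eq_none_iff _ _).mp e) hRne
    | some m => rw [hbest, e]; simpa using PySem.List.max?_mem e
  have hbestmax : ∀ y ∈ R, y ≤ best := by
    cases e : PySem.List.max? R (fun x => x) with
    | none => exact absurd ((PySem.List.max?_eq_none_iff _ _).mp e) hRne
    | some m =>
        intro y hy
        rw [hbest, e]
        simpa using PySem.List.max?_isMax e y hy
  -- the row maxima: membership and bound
  have hrowmax_mem : ∀ row ∈ matrix,
      (PySem.List.max? (PySem.List.slice row none (some c)) (fun x => x)).getD 0 ∈ row.take r.length := by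
    intro row hrow
    have hrl := hlen' row hrow
    have htne : row.take r.length ≠ [] :=
      List.ne_nil_of_length_pos (by rw [List.length_take]; omega)
    rw [hslice row]
    cases e : PySem.List.max? (row.take r.length) (fun x => x) with
    | none => exact absurd ((PySem.List.max?_eq_none_iff _ _).mp e) htne
    | some m => simpa [e] using PySem.List.max?_mem e
  have hrowmax_ub : ∀ row ∈ matrix, ∀ x ∈ row.take r.length,
      x ≤ (PySem.List.max? (PySem.List.slice row none (some c)) (fun x => x)).getD 0 := by
    intro row hrow x hx
    have hrl := hlen' row hrow
    have htne : row.take r.length ≠ [] :=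
      List.ne_nil_of_length_pos (by rw [List.length_take]; omega)
    rw [hslice row]
    cases e : PySem.List.max? (row.take r.length) (fun x => x) with
    | none => exact absurd ((PySem.List.max?_eq_none_iff _ _).mp e) htne
    | some m =>
        have := PySem.List.max?_isMax e x hx
        simpa [e] using this
  -- H1: every column max is ≤ best
  have H1 : ∀ i ∈ PySem.List.pyRange 0 c, pvCm matrix i ≤ best := by
    intro i hi
    obtain ⟨hi0, hic⟩ := (PySem.List.mem_pyRange_one).mp hi
    have hcm := pvCm_mem hm' i
    unfold pvCol at hcm
    obtain ⟨row, hrow, hval⟩ := List.mem_map.mp hcm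
    have hirow : i.toNat < row.length := by
      have := hlen' row hrow
      omega
    have hval' : pvCm matrix i = row[i.toNat] := by
      rw [← hval, PySem.List.pyGetD_eq_getElem row 0 hi0 (by omega)]
    have hmemtake : row[i.toNat] ∈ row.take r.length := by
      have hit : i.toNat < r.length := by omega
      have : (row.take r.length)[i.toNat]'(by simp; omega) = row[i.toNat] := List.getElem_take
      exact this ▸ List.getElem_mem _
    calc pvCm matrix i = row[i.toNat] := hval'
      _ ≤ _ := hrowmax_ub row hrow _ hmemtake
      _ ≤ best := hbestmax _ (List.mem_map.mpr ⟨row, hrow, rfl⟩)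
  -- H2: best is attained as a column max
  have H2 : ∃ i ∈ PySem.List.pyRange 0 c, pvCm matrix i = best := by
    obtain ⟨row, hrow, hval⟩ := List.mem_map.mp hbestmem
    have hmem : best ∈ row.take r.length := hval ▸ hrowmax_mem row hrow
    obtain ⟨k, hk, hkval⟩ := List.mem_iff_getElem.mp hmem
    have hk' : k < r.length := by
      have := List.length_take_le r.length row
      simp at hk
      omega
    have hkrow : k < row.length := by
      have := hlen' row hrow
      omega
    have hkval' : row[k] = best := by
      rw [← hkval]
      exact (List.getElem_take).symm
    refine ⟨(k : Int), PySem.List.mem_pyRange_one.mpr ⟨by omega, by rw [hcdef]; exact_mod_cast hk'⟩, ?_⟩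
    have hget : PySem.List.pyGetD row (k : Int) 0 = best := by
      rw [PySem.List.pyGetD_eq_getElem row 0 (by omega) (by exact_mod_cast hkrow)]
      simpa using hkval'
    have hbestcol : best ∈ pvCol matrix (k : Int) := by
      unfold pvCol; exact List.mem_map.mpr ⟨row, hrow, hget⟩
    have h1 : best ≤ pvCm matrix (k : Int) := pvCm_isMax hm' _ _ hbestcol
    have h2 : pvCm matrix (k : Int) ≤ best :=
      H1 _ (PySem.List.mem_pyRange_one.mpr ⟨by omega, by rw [hcdef]; exact_mod_cast hk'⟩)
    omega
  obtain ⟨i0, hA, hB⟩ := find_loop matrix alternatives best hm' (PySem.List.pyRange 0 c) H1 H2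
  -- now compute both sides
  unfold Spec_maxmax maxmax maxmax_alt
  rw [hc]
  simp only [column_eq]
  rw [PySem.List.foldl_append_singleton_eq_map]
  simp only [List.nil_append]
  rw [show (fun i => ((PySem.List.max? (pvCol matrix i) (fun x => x)).getD 0, i))
        = (fun i => (pvCm matrix i, i)) from rfl]
  rw [hA, hB]
  simp
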